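-- pv_equiv track=rewrite | github.com/abstractlyZach/voting | voting/collect_votes.py | convert_ballot_to_ranked_choice
-- ===== SOURCE A (Python) =====
-- import typing
--
-- EMPTY_VOTE = ""
--
-- def convert_ballot_to_ranked_choice(ballot: typing.Dict) -> typing.List:
--     """Convert a ballot into a ranked choice list."""
--     rank_to_candidate = {
--         int(rank): candidate for candidate, rank in ballot.items() if rank != EMPTY_VOTE
--     }
--     ranked_candidates = []
--     for i in range(1, 10):
--         if i in rank_to_candidate:
--             ranked_candidates.append(rank_to_candidate[i])
--         else:
--             break
--     return ranked_candidates
-- ===== SOURCE B (Python) =====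
-- import typing
--
-- EMPTY_VOTE = ""
--
-- def convert_ballot_to_ranked_choice(ballot: typing.Dict) -> typing.List:
--     """Convert a ballot into a ranked choice list (sort-then-walk)."""
--     rank_to_candidate = {}
--     for candidate, rank in ballot.items():
--         if rank != EMPTY_VOTE:
--             rank_to_candidate[int(rank)] = candidate
--     ranked_candidates = []
--     expected = 1
--     for rank, candidate in sorted(rank_to_candidate.items(), key=lambda item: item[0]):
--         if rank < 1:
--             continue
--         if rank != expected or expected > 9:
--             break
--         ranked_candidates.append(candidate)
--         expected += 1
--     return ranked_candidates
-- ===== Notes on version B (the rewrite author's own statement) =====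
-- stated objective: alternative
-- what changed: Replaces A's fixed 1..9 dict-probing loop (membership test + lookup per rank) with a single sorted walk over the dict's (rank, candidate) items driven by an 'expected' counter that skips sub-1 ranks and stops at the first gap or past rank 9.
import Mathlib
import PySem

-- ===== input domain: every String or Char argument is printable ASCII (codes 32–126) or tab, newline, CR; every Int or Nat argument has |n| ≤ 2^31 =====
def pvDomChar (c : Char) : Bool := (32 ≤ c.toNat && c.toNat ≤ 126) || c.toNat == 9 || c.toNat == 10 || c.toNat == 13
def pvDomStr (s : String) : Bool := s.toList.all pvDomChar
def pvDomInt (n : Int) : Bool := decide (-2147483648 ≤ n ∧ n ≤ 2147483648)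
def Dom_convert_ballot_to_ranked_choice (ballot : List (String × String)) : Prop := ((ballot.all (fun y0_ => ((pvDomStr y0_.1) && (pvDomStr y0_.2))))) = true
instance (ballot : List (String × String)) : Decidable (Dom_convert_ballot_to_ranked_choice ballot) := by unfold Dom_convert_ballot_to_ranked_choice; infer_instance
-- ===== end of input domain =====

-- B replaces A's fixed 1..9 dict-probing loop with a single sorted walk over the rank dict's items; objective: alternative decomposition (return value only; neither version mutates its argument).


-- shared helper: the 'rank_to_candidate' dict both Source A and Source B build the same way
-- (int() is exact via PySem.Int.ofStr?; Pre_ excludes its ValueError, so the .getD 0 is never decisive)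
def pvRankDict (ballot : List (String × String)) : PySem.Dict Int String :=
  ballot.foldl
    (fun d p => if p.2 ≠ "" then d.insert ((PySem.Int.ofStr? p.2).getD 0) p.1 else d)
    PySem.Dict.empty

-- ===== PORT A =====
-- the 'for i in range(1, 10): if i in dict: append else: break' loop
def pvProbe (d : PySem.Dict Int String) : List Int → List String
  | [] => []
  | i :: rest =>
    match d.get? i with
    | some c => c :: pvProbe d rest
    | none => []

def convert_ballot_to_ranked_choice (ballot : List (String × String)) : List String :=
  pvProbe (pvRankDict ballot) (PySem.List.pyRange 1 10 1)

-- ===== PORT B =====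
-- B's walk over the key-sorted items: skip sub-1 ranks, extend the 1,2,3,… prefix while the rank matches 'expected', stop at a gap or past 9
def pvWalk : List (Int × String) → Int → List String
  | [], _ => []
  | (r, c) :: rest, expected =>
    if r < 1 then pvWalk rest expected
    else if r ≠ expected ∨ expected > 9 then []
    else c :: pvWalk rest (expected + 1)

def convert_ballot_to_ranked_choice_alt (ballot : List (String × String)) : List String :=
  pvWalk (PySem.List.sorted (pvRankDict ballot).items (fun item => item.1) false) 1

-- ===== PRECONDITION & SPEC =====
-- Pre_ excludes exactly the ballots where some non-empty rank string is not int()-parseable: there Python A raises ValueError (B too).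
def Pre_convert_ballot_to_ranked_choice (ballot : List (String × String)) : Prop :=
  ∀ p ∈ ballot, p.2 ≠ "" → (PySem.Int.ofStr? p.2).isSome = true
instance (ballot : List (String × String)) : Decidable (Pre_convert_ballot_to_ranked_choice ballot) := by
  unfold Pre_convert_ballot_to_ranked_choice; infer_instance

def pvWitness_convert_ballot_to_ranked_choice : (List (String × String)) :=
  [("alice", "1"), ("bob", "2"), ("carol", "")]

def Spec_convert_ballot_to_ranked_choice (ballot : List (String × String)) (out : List String) : Prop := out = convert_ballot_to_ranked_choice_alt ballot
instance (ballot : List (String × String)) (out : List String) : Decidable (Spec_convert_ballot_to_ranked_choice ballot out) := by unfold Spec_convert_ballot_to_ranked_choice; infer_instance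

-- ===== CLAIM (what is proved, stated in full; the proofs are below) =====
def Claim_equal_convert_ballot_to_ranked_choice : Prop := ∀ (ballot : List (String × String)), Dom_convert_ballot_to_ranked_choice ballot → Pre_convert_ballot_to_ranked_choice ballot → Spec_convert_ballot_to_ranked_choice ballot (convert_ballot_to_ranked_choice ballot)

-- ===== LEMMAS AND PROOFS =====

lemma pvRankDict_nodup_keys (ballot : List (String × String)) : (pvRankDict ballot).keys.Nodup := by
  unfold pvRankDict
  have h : ∀ (l : List (String × String)) (d : PySem.Dict Int String), d.keys.Nodup →
      (l.foldl (fun d p => if p.2 ≠ "" then d.insert ((PySem.Int.ofStr? p.2).getD 0) p.1 else d) d).keys.Nodup := by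
    intro l
    induction l with
    | nil => intro d hd; simpa using hd
    | cons p t ih =>
      intro d hd
      simp only [List.foldl_cons]
      split
      · exact ih _ (PySem.Dict.nodup_keys_insert _ _ _ hd)
      · exact ih _ hd
  exact h ballot PySem.Dict.empty (by simp)

lemma pvRange_empty (e : Int) (h : (10:Int) ≤ e) : PySem.List.pyRange e 10 1 = [] := by
  rw [PySem.List.pyRange_one]
  have h0 : ((10:Int) - e).toNat = 0 := by omega
  simp [h0]

-- core invariant: the sorted walk from 'expected = e' computes exactly A's probing of e,e+1,…,9
lemma pvWalk_eq_probe (d : PySem.Dict Int String) :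
    ∀ (s : List (Int × String)) (e : Int), 1 ≤ e →
      s.Pairwise (fun a b => a.1 < b.1) →
      (∀ p ∈ s, d.get? p.1 = some p.2) →
      (∀ k v, e ≤ k → d.get? k = some v → (k, v) ∈ s) →
      (∀ p ∈ s, p.1 < 1 ∨ e ≤ p.1) →
      pvWalk s e = pvProbe d (PySem.List.pyRange e 10 1) := by
  intro s
  induction s with
  | nil =>
    intro e he _ _ hcomp _
    by_cases hlt : e < 10
    · rw [PySem.List.pyRange_one_cons hlt]
      have hnone : d.get? e = none := by
        cases hget : d.get? e with
        | none => rfl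
        | some v => exact absurd (hcomp e v le_rfl hget) (List.not_mem_nil)
      simp [pvWalk, pvProbe, hnone]
    · rw [pvRange_empty e (by omega)]; rfl
  | cons p t ih =>
    obtain ⟨r, c⟩ := p
    intro e he hpw hsound hcomp hrange
    have hpw_t : t.Pairwise (fun a b => a.1 < b.1) := hpw.of_cons
    have hhead : ∀ q ∈ t, r < q.1 := by
      intro q hq; exact (List.pairwise_cons.mp hpw).1 q hq
    by_cases hr1 : r < 1
    · -- skip branch
      rw [show pvWalk ((r, c) :: t) e = pvWalk t e from by simp [pvWalk, hr1]]
      refine ih e he hpw_t (fun q hq => hsound q (List.mem_cons_of_mem _ hq)) ?_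
        (fun q hq => hrange q (List.mem_cons_of_mem _ hq))
      intro k v hk hget
      rcases List.mem_cons.mp (hcomp k v hk hget) with heq | hmem
      · exfalso
        have hk1 : k = r := congrArg Prod.fst heq
        omega
      · exact hmem
    · have her : e ≤ r := by
        rcases hrange (r, c) List.mem_cons_self with h1 | h1
        · omega
        · exact h1
      by_cases hmatch : r = e ∧ e ≤ 9
      · obtain ⟨hre, he9⟩ := hmatch
        have hlt : e < 10 := by omega
        rw [PySem.List.pyRange_one_cons hlt]
        have hget : d.get? e = some c := by
          have := hsound (r, c) List.mem_cons_self; rwa [hre] at this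
        have hL : pvWalk ((r, c) :: t) e = c :: pvWalk t (e + 1) := by
          simp only [pvWalk]
          rw [if_neg hr1, if_neg (show ¬(r ≠ e ∨ e > 9) by omega)]
        rw [hL]
        have hR : pvProbe d (e :: PySem.List.pyRange (e+1) 10 1)
            = c :: pvProbe d (PySem.List.pyRange (e+1) 10 1) := by
          simp [pvProbe, hget]
        rw [hR]
        refine congrArg (c :: ·) (ih (e+1) (by omega) hpw_t
          (fun q hq => hsound q (List.mem_cons_of_mem _ hq)) ?_ ?_)
        · intro k v hk hget'
          rcases List.mem_cons.mp (hcomp k v (by omega) hget') with heq | hmem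
          · exfalso
            have hk1 : k = r := congrArg Prod.fst heq
            omega
          · exact hmem
        · intro q hq
          right; have := hhead q hq; omega
      · -- break branch
        have hcond : r ≠ e ∨ e > 9 := by
          by_cases hre : r = e
          · right; omega
          · left; exact hre
        have hL : pvWalk ((r, c) :: t) e = [] := by
          simp only [pvWalk]
          rw [if_neg hr1, if_pos hcond]
        rw [hL]
        by_cases hlt : e < 10
        · have hgt : e < r := by
            rcases hcond with h1 | h1
            · omega
            · omega
          rw [PySem.List.pyRange_one_cons hlt]
          have hnone : d.get? e = none := by
            cases hget : d.get? e with
            | none => rfl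
            | some v =>
              exfalso
              rcases List.mem_cons.mp (hcomp e v le_rfl hget) with heq | hmem
              · have : e = r := congrArg Prod.fst heq
                omega
              · have := hhead (e, v) hmem; simp at this; omega
          simp [pvProbe, hnone]
        · rw [pvRange_empty e (by omega)]; rfl

-- ===== VERDICT (by name: the statement is the Claim_ definition above) =====
theorem convert_ballot_to_ranked_choice_spec : Claim_equal_convert_ballot_to_ranked_choice := by
  intro ballot _ _
  unfold Spec_convert_ballot_to_ranked_choice
  unfold convert_ballot_to_ranked_choice convert_ballot_to_ranked_choice_alt
  set d := pvRankDict ballot with hd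
  have hnd : d.keys.Nodup := pvRankDict_nodup_keys ballot
  set s := PySem.List.sorted d.items (fun item => item.1) false with hs
  have hperm : s.Perm d.items := PySem.List.sorted_perm d.items (fun item => item.1) false
  have hle : s.Pairwise (fun a b => a.1 ≤ b.1) := PySem.List.sorted_pairwise d.items (fun item => item.1)
  have hkeysnd : (s.map Prod.fst).Nodup := by
    refine ((hperm.map Prod.fst).nodup_iff).mpr ?_
    simpa [PySem.Dict.keys] using hnd
  have hne : s.Pairwise (fun a b => a.1 ≠ b.1) := by
    rw [List.nodup_iff_pairwise_ne, List.pairwise_map] at hkeysnd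
    exact hkeysnd
  have hpw : s.Pairwise (fun a b => a.1 < b.1) :=
    (hle.and hne).imp (fun h => lt_of_le_of_ne h.1 h.2)
  exact (pvWalk_eq_probe d s 1 le_rfl hpw
    (fun p hp => PySem.Dict.get?_of_mem_items d (hperm.mem_iff.mp hp) hnd)
    (fun k v _ hget => hperm.mem_iff.mpr (PySem.Dict.mem_items_of_get?_eq_some d hget))
    (fun p _ => by omega)).symm
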